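-- pv_equiv track=rewrite | github.com/OllieBrownie/AdventOfCode | 2025/Code/Day 3.py | insert_into_max_array
-- ===== SOURCE A (Python) =====
-- def insert_into_max_array(char, curr_max_array, curr_index, row_length):
--     starting_max_index = len(curr_max_array) - min(len(curr_max_array), row_length - curr_index)
--
--     has_found = False
--     for i in range(starting_max_index, len(curr_max_array)):
--         if has_found:
--             curr_max_array[i] = -1
--         elif char > curr_max_array[i]:
--             curr_max_array[i] = char
--             has_found = True
--     return curr_max_array
-- ===== SOURCE B (Python) =====
-- def insert_into_max_array(char, curr_max_array, curr_index, row_length):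
--     # Splits the trailing window into its unbeatable prefix (kept, accumulated
--     # takeWhile-style) and, if anything remains, rebuilds the rest as
--     # kept + [char] + [-1]-fill in one splice, instead of A's flagged
--     # in-place element-by-element writes.
--     # Mutates curr_max_array in place (like A) and returns it.
--     start = len(curr_max_array) - min(len(curr_max_array), row_length - curr_index)
--     window = curr_max_array[start:]
--     kept = []
--     for x in window:
--         if x < char:
--             break
--         kept.append(x)
--     if len(kept) < len(window):
--         curr_max_array[start:] = kept + [char] + [-1] * (len(window) - len(kept) - 1)
--     return curr_max_array
-- ===== Notes on version B (the rewrite author's own statement) =====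
-- stated objective: alternative
-- what changed: Replaces A's index loop with a found flag and per-element in-place writes by a takeWhile-style split of the trailing window into its unbeatable prefix, rebuilding the remainder as kept + [char] + [-1]-fill by list concatenation and splicing it back in a single slice assignment.
import Mathlib
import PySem

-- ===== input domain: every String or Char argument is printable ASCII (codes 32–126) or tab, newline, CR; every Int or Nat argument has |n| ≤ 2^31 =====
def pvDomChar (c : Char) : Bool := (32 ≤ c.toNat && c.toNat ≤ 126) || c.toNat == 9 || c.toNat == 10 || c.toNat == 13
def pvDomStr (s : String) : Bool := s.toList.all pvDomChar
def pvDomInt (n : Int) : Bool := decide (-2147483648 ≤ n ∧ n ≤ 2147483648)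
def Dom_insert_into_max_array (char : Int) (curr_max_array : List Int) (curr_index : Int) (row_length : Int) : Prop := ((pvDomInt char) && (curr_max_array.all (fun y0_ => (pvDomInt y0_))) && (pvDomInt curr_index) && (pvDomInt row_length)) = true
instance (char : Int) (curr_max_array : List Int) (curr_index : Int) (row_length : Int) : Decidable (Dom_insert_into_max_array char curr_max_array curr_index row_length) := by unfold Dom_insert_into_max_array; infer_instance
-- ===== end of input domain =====

-- B replaces A's flag-guarded index loop with per-element in-place writes by a
-- takeWhile-style split of the trailing window into its unbeatable prefix,
-- rebuilding the remainder by concatenation and splicing it back in one slice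
-- assignment (objective: alternative).
-- Both Pythons mutate curr_max_array in place and return it; the equivalence
-- proved here is about the return value (B performs the same mutation).

-- ===== PORT A =====
-- A's loop body: state = (the array, has_found); indices i from the range are
-- always in bounds, so pyGetD is exact for curr_max_array[i].
def pvStepA (char : Int) (st : List Int × Bool) (i : Int) : List Int × Bool :=
  if st.2 then (st.1.set i.toNat (-1), true)
  else if char > PySem.List.pyGetD st.1 i.toNat 0 then (st.1.set i.toNat char, true)
  else st

def insert_into_max_array (char : Int) (curr_max_array : List Int) (curr_index : Int) (row_length : Int) : List Int :=
  let n : Int := curr_max_array.length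
  let starting_max_index : Int := n - min n (row_length - curr_index)
  ((PySem.List.pyRange starting_max_index n 1).foldl (pvStepA char) (curr_max_array, false)).1

-- ===== PORT B =====
-- Source B's kept-prefix loop ('for x in window: if x < char: break; kept.append(x)')
def pvKept (char : Int) : List Int → List Int
  | [] => []
  | x :: t => if x < char then [] else x :: pvKept char t

-- curr_max_array[start:] → PySem.List.slice; the splice-back
-- curr_max_array[start:] = nw (0 ≤ start, clamped like take) → take ++ nw.
def insert_into_max_array_alt (char : Int) (curr_max_array : List Int) (curr_index : Int) (row_length : Int) : List Int :=
  let n : Int := curr_max_array.length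
  let start : Int := n - min n (row_length - curr_index)
  let window : List Int := PySem.List.slice curr_max_array (some start) none
  let kept : List Int := pvKept char window
  if kept.length < window.length then
    curr_max_array.take start.toNat ++
      (kept ++ [char] ++ List.replicate (window.length - kept.length - 1) (-1))
  else curr_max_array

-- ===== PRECONDITION & SPEC =====
def Spec_insert_into_max_array (char : Int) (curr_max_array : List Int) (curr_index : Int) (row_length : Int) (out : List Int) : Prop := out = insert_into_max_array_alt char curr_max_array curr_index row_length
instance (char : Int) (curr_max_array : List Int) (curr_index : Int) (row_length : Int) (out : List Int) : Decidable (Spec_insert_into_max_array char curr_max_array curr_index row_length out) := by unfold Spec_insert_into_max_array; infer_instance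

-- ===== CLAIM =====
def Claim_equal_insert_into_max_array : Prop := ∀ (char : Int) (curr_max_array : List Int) (curr_index : Int) (row_length : Int), Dom_insert_into_max_array char curr_max_array curr_index row_length → Spec_insert_into_max_array char curr_max_array curr_index row_length (insert_into_max_array char curr_max_array curr_index row_length)

-- ===== LEMMAS AND PROOFS =====

-- take (k+1) of a set at k = take k ++ [v]  (k in bounds)
theorem pv_take_set (a : List Int) (k : Nat) (v : Int) (hk : k < a.length) :
    (a.set k v).take (k + 1) = a.take k ++ [v] := by
  have h : a.set k v = a.take k ++ v :: a.drop (k + 1) := by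
    rw [List.set_eq_take_append_cons_drop]; simp [hk]
  have hl : (a.take k).length = k := List.length_take_of_le (Nat.le_of_lt hk)
  rw [h, show k + 1 = (a.take k).length + 1 by rw [hl], List.take_append]
  simp

-- once has_found is true, A's remaining iterations overwrite everything with -1
theorem pv_foldl_found (char : Int) :
    ∀ (m : Nat) (s : Int) (a : List Int), 0 ≤ s → a.length - s.toNat ≤ m →
    ((PySem.List.pyRange s (a.length : Int) 1).foldl (pvStepA char) (a, true)).1
      = a.take s.toNat ++ List.replicate (a.length - s.toNat) (-1) := by
  intro m
  induction m with
  | zero =>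
    intro s a hs hm
    have hsl : (a.length : Int) ≤ s := by omega
    rw [PySem.List.pyRange_one_eq_nil hsl]
    have h0 : a.length - s.toNat = 0 := by omega
    simp [h0, List.take_of_length_le (show a.length ≤ s.toNat by omega)]
  | succ m ih =>
    intro s a hs hm
    by_cases h : s < (a.length : Int)
    · rw [PySem.List.pyRange_one_cons h]
      have hk : s.toNat < a.length := by omega
      have hstep : pvStepA char (a, true) s = (a.set s.toNat (-1), true) := by
        simp [pvStepA]
      rw [List.foldl_cons, hstep,
        show ((a.length : Int)) = ((a.set s.toNat (-1)).length : Int) by simp,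
        ih (s + 1) (a.set s.toNat (-1)) (by omega) (by simp; omega)]
      have h1 : (s + 1).toNat = s.toNat + 1 := by omega
      rw [List.length_set, h1, pv_take_set a s.toNat (-1) hk]
      have h2 : a.length - s.toNat = (a.length - (s.toNat + 1)) + 1 := by omega
      rw [h2, List.replicate_succ, List.append_assoc]
      rfl
    · rw [PySem.List.pyRange_one_eq_nil (by omega)]
      have h0 : a.length - s.toNat = 0 := by omega
      simp [h0, List.take_of_length_le (show a.length ≤ s.toNat by omega)]

-- main invariant: A's fold from s (flag still false) equals the kept-prefix
-- split-and-rebuild of the dropped suffix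
theorem pv_main (char : Int) (a : List Int) :
    ∀ (m : Nat) (s : Int), 0 ≤ s → a.length - s.toNat ≤ m →
    ((PySem.List.pyRange s (a.length : Int) 1).foldl (pvStepA char) (a, false)).1
      = if (pvKept char (a.drop s.toNat)).length < (a.drop s.toNat).length then
          a.take s.toNat ++ (pvKept char (a.drop s.toNat) ++ [char] ++
            List.replicate ((a.drop s.toNat).length
              - (pvKept char (a.drop s.toNat)).length - 1) (-1))
        else a := by
  intro m
  induction m with
  | zero =>
    intro s hs hm
    have hsl : (a.length : Int) ≤ s := by omega
    rw [PySem.List.pyRange_one_eq_nil hsl]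
    have h0 : a.drop s.toNat = [] := List.drop_eq_nil_of_le (by omega)
    simp [h0, pvKept]
  | succ m ih =>
    intro s hs hm
    by_cases h : s < (a.length : Int)
    · rw [PySem.List.pyRange_one_cons h]
      have hk : s.toNat < a.length := by omega
      have hcast : ((s.toNat : Int)) = s := by omega
      have hdrop : a.drop s.toNat = a[s.toNat] :: a.drop (s.toNat + 1) :=
        List.drop_eq_getElem_cons hk
      have hget : PySem.List.pyGetD a s 0 = a[s.toNat] :=
        PySem.List.pyGetD_eq_getElem a 0 hs h
      by_cases hc : char > a[s.toNat]
      · have hstep : pvStepA char (a, false) s = (a.set s.toNat char, true) := by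
          simp only [pvStepA]; rw [hcast]; simp [hget, hc]
        rw [List.foldl_cons, hstep,
          show ((a.length : Int)) = ((a.set s.toNat char).length : Int) by simp,
          pv_foldl_found char a.length (s + 1) (a.set s.toNat char) (by omega)
            (by simp)]
        rw [hdrop]
        simp only [pvKept, if_pos hc, List.length_nil, List.length_cons]
        rw [if_pos (by omega)]
        have h1 : (s + 1).toNat = s.toNat + 1 := by omega
        rw [List.length_set, h1, pv_take_set a s.toNat char hk]
        have h2 : (a.drop (s.toNat + 1)).length = a.length - (s.toNat + 1) := by
          simp
        simp only [h2, List.append_assoc, List.nil_append, List.singleton_append]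
        congr 2
      · have hstep : pvStepA char (a, false) s = (a, false) := by
          simp only [pvStepA]; rw [hcast]; simp [hget, hc]
        rw [List.foldl_cons, hstep, ih (s + 1) (by omega) (by omega), hdrop]
        have h1 : (s + 1).toNat = s.toNat + 1 := by omega
        simp only [pvKept, if_neg hc, h1]
        have htake : List.take (s.toNat + 1) a = List.take s.toNat a ++ [a[s.toNat]] := by
          rw [List.take_add_one, List.getElem?_eq_getElem hk]
          rfl
        have hlen : (List.drop (s.toNat + 1) a).length = a.length - (s.toNat + 1) := by
          simp
        by_cases hP : (pvKept char (List.drop (s.toNat + 1) a)).length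
            < (List.drop (s.toNat + 1) a).length
        · rw [if_pos hP, if_pos (by simp only [List.length_cons]; omega),
            htake, List.append_assoc]
          simp only [List.cons_append, List.nil_append, List.length_cons]
          congr 4
          omega
        · rw [if_neg hP, if_neg (by simp only [List.length_cons]; omega)]
    · rw [PySem.List.pyRange_one_eq_nil (by omega)]
      have h0 : a.drop s.toNat = [] := List.drop_eq_nil_of_le (by omega)
      simp [h0, pvKept]

-- ===== VERDICT =====
theorem insert_into_max_array_spec : Claim_equal_insert_into_max_array := by
  intro char a ci rl _
  unfold Spec_insert_into_max_array insert_into_max_array insert_into_max_array_alt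
  dsimp only
  have hs : 0 ≤ (a.length : Int) - min (a.length : Int) (rl - ci) := by omega
  rw [PySem.List.slice_from a hs]
  exact pv_main char a a.length _ hs (by omega)
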